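-- pv_equiv track=rewrite | github.com/sandersirge/MorseCodeTrainer | src/main/python/services/morse_audio.py | _parse_morse_sequence
-- ===== SOURCE A (Python) =====
-- from typing import Iterable, Tuple
--
-- _UNIT_GAP_AFTER_SYMBOL = 1
--
-- _GAP_BETWEEN_LETTERS = 3
--
-- _GAP_BETWEEN_WORDS = 7
--
-- def _parse_morse_sequence(morse_code: str) -> Iterable[Tuple[str, int]]:
--     """Yield (type, units) pairs describing tones and silences."""
--
--     stripped = morse_code.strip()
--     if not stripped:
--         return []
--
--     events: list[Tuple[str, int]] = []
--     words = [word for word in stripped.split("   ") if word != ""]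
--     for word_index, word in enumerate(words):
--         letters = [letter for letter in word.split(" ") if letter != ""]
--         for letter_index, letter in enumerate(letters):
--             for symbol_index, symbol in enumerate(letter):
--                 if symbol == '.':
--                     events.append(("tone", 1))
--                 elif symbol == '-':
--                     events.append(("tone", 3))
--                 else:
--                     raise ValueError(f"Unsupported symbol '{symbol}' in Morse code")
--                 if symbol_index != len(letter) - 1:
--                     events.append(("gap", _UNIT_GAP_AFTER_SYMBOL))
--             if letter_index != len(letters) - 1:
--                 events.append(("gap", _GAP_BETWEEN_LETTERS))
--         if word_index != len(words) - 1:
--             events.append(("gap", _GAP_BETWEEN_WORDS))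
--     return events
-- ===== SOURCE B (Python) =====
-- def _parse_morse_sequence(morse_code: str):
--     """Yield (type, units) pairs describing tones and silences.
--
--     Single left-to-right scan with a run-length counter for pending spaces:
--     0 spaces between symbols -> unit gap (1), 1-2 spaces -> letter gap (3),
--     3+ spaces -> word gap (7).
--     """
--     events = []
--     spaces = 0
--     started = False
--     for symbol in morse_code.strip():
--         if symbol == ' ':
--             spaces += 1
--         elif symbol == '.' or symbol == '-':
--             if started:
--                 if spaces == 0:
--                     events.append(("gap", 1))
--                 elif spaces < 3:
--                     events.append(("gap", 3))
--                 else: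
--                     events.append(("gap", 7))
--             spaces = 0
--             started = True
--             events.append(("tone", 1 if symbol == '.' else 3))
--         else:
--             raise ValueError(f"Unsupported symbol '{symbol}' in Morse code")
--     return events
-- ===== Notes on version B (the rewrite author's own statement) =====
-- stated objective: simpler
-- what changed: A builds word and letter lists via nested split(' ')/split(' ') passes with enumerate last-index tests and joins them back; B is a single left-to-right scan over the stripped string that keeps a pending-space run-length counter and emits gap 1/3/7 events directly (0 spaces -> 1, 1-2 -> 3, >=3 -> 7), with no intermediate lists.
-- outside the precondition, e.g. on _parse_morse_sequence('.x'): A raises ValueError, B raises ValueError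
import Mathlib
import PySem

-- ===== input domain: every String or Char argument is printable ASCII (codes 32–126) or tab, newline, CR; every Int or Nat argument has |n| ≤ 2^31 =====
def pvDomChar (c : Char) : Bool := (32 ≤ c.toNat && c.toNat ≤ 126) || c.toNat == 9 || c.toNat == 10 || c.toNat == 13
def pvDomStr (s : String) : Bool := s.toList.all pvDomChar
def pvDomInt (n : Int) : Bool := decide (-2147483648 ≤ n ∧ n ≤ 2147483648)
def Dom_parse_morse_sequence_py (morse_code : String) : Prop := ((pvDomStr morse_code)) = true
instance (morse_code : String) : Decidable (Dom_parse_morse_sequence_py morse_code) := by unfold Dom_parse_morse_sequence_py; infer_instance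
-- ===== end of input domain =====

-- B replaces A's nested word/letter split-and-join passes by a single left-to-right scan
-- with a run-length counter for pending spaces (objective: simpler, one pass, no intermediate lists).

-- ===== PORT A =====
def parse_morse_sequence_py (morse_code : String) : List (String × Int) :=
  let stripped := PySem.Chars.strip morse_code.toList
  if stripped = [] then []
  else
    let words := (PySem.Chars.splitOn stripped [' ', ' ', ' ']).filter (fun w => decide (w ≠ []))
    (PySem.List.enumerate words).foldl (fun ev wi =>
      let letters := (PySem.Chars.splitOn wi.2 [' ']).filter (fun l => decide (l ≠ []))
      let ev := (PySem.List.enumerate letters).foldl (fun ev li =>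
        let ev := (PySem.List.enumerate li.2).foldl (fun ev si =>
          let ev := if si.2 = '.' then ev ++ [("tone", (1 : Int))]
            else if si.2 = '-' then ev ++ [("tone", (3 : Int))]
            else ev  -- Python raises ValueError here; such inputs are excluded by Pre_
          if si.1 ≠ (li.2.length : Int) - 1 then ev ++ [("gap", (1 : Int))] else ev) ev
        if li.1 ≠ (letters.length : Int) - 1 then ev ++ [("gap", (3 : Int))] else ev) ev
      if wi.1 ≠ (words.length : Int) - 1 then ev ++ [("gap", (7 : Int))] else ev) []

-- ===== PORT B =====
def parse_morse_sequence_py_alt (morse_code : String) : List (String × Int) :=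
  ((PySem.Chars.strip morse_code.toList).foldl (fun st c =>
      if c = ' ' then (st.1, st.2.1 + 1, st.2.2)
      else if c = '.' ∨ c = '-' then
        let ev := if st.2.2 then
            st.1 ++ [("gap", if st.2.1 = 0 then (1 : Int) else if st.2.1 < 3 then 3 else 7)]
          else st.1
        (ev ++ [("tone", if c = '.' then (1 : Int) else 3)], 0, true)
      else st  -- Python raises ValueError here; such inputs are excluded by Pre_
    ) (([], 0, false) : List (String × Int) × Int × Bool)).1

-- ===== PRECONDITION & SPEC =====
-- Pre_: the (stripped) input contains only '.', '-' and ' '; on any other character the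
-- Python raises ValueError (both A and B raise there), so those inputs are excluded.
def Pre_parse_morse_sequence_py (morse_code : String) : Prop :=
  (PySem.Chars.strip morse_code.toList).all (fun c => c == '.' || c == '-' || c == ' ') = true
instance (morse_code : String) : Decidable (Pre_parse_morse_sequence_py morse_code) := by unfold Pre_parse_morse_sequence_py; infer_instance

def pvWitness_parse_morse_sequence_py : String := " .- .   -.. "

def Spec_parse_morse_sequence_py (morse_code : String) (out : List (String × Int)) : Prop := out = parse_morse_sequence_py_alt morse_code
instance (morse_code : String) (out : List (String × Int)) : Decidable (Spec_parse_morse_sequence_py morse_code out) := by unfold Spec_parse_morse_sequence_py; infer_instance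

-- ===== CLAIM (what is proved, stated in full; the proofs are below) =====
def Claim_equal_parse_morse_sequence_py : Prop := ∀ (morse_code : String), Dom_parse_morse_sequence_py morse_code → Pre_parse_morse_sequence_py morse_code → Spec_parse_morse_sequence_py morse_code (parse_morse_sequence_py morse_code)

-- ===== LEMMAS AND PROOFS =====

-- tone event for a symbol character
def pvTn (c : Char) : String × Int := ("tone", if c = '.' then 1 else 3)

-- what A's innermost loop appends for one character
def pvSymOut (c : Char) : List (String × Int) :=
  if c = '.' then [("tone", (1 : Int))] else if c = '-' then [("tone", (3 : Int))] else []

lemma pvSymOut_sym {c : Char} (hc : c = '.' ∨ c = '-') : pvSymOut c = [pvTn c] := by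
  rcases hc with h | h <;> subst h <;> decide

def pvGapVal (k : Nat) : Int := if k = 0 then 1 else if k < 3 then 3 else 7

def pvSp (k : Nat) : List Char := List.replicate k ' '

-- join chunks with a single separator element between them
def pvJoin {α : Type} (sep : α) : List (List α) → List α
  | [] => []
  | [p] => p
  | p :: q :: l => p ++ sep :: pvJoin sep (q :: l)

lemma pvJoin_cons_ne {α : Type} (sep : α) (p : List α) {l : List (List α)} (hl : l ≠ []) :
    pvJoin sep (p :: l) = p ++ sep :: pvJoin sep l := by
  cases l with
  | nil => exact absurd rfl hl
  | cons q l => rfl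

lemma pvJoin_cons_head {α : Type} (sep x : α) (p : List α) (l : List (List α)) :
    pvJoin sep ((x :: p) :: l) = x :: pvJoin sep (p :: l) := by
  cases l with
  | nil => rfl
  | cons q l => simp [pvJoin]

-- A's enumerate loop with "append sep unless last index" is a join
lemma pvEnumFold {α : Type} (g : α → List (String × Int)) (sep : String × Int) (n : Int) :
    ∀ (xs : List α) (start : Int) (acc : List (String × Int)), n = start + xs.length - 1 →
    (PySem.List.enumerate xs start).foldl
      (fun ev p => if p.1 ≠ n then (ev ++ g p.2) ++ [sep] else ev ++ g p.2) acc
    = acc ++ pvJoin sep (xs.map g) := by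
  intro xs
  induction xs with
  | nil => intro start acc _; simp [PySem.List.enumerate, pvJoin]
  | cons x t ih =>
    intro start acc hn
    rw [show PySem.List.enumerate (x :: t) start = (start, x) :: PySem.List.enumerate t (start + 1) from rfl]
    rw [List.foldl_cons]
    cases t with
    | nil =>
      have hx : ¬ ((start, x).1 ≠ n) := by
        show ¬ (start ≠ n)
        simp [List.length_cons] at hn
        omega
      rw [if_neg hx]
      simp [PySem.List.enumerate, pvJoin]
    | cons y t' =>
      have hx : ((start, x).1 ≠ n) := by
        show start ≠ n
        simp [List.length_cons] at hn
        omega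
      rw [if_pos hx]
      rw [ih (start + 1) _ (by simp [List.length_cons] at hn ⊢; omega)]
      conv_rhs => rw [show List.map g (x :: y :: t') = g x :: List.map g (y :: t') from rfl,
        pvJoin_cons_ne _ _ (by simp : List.map g (y :: t') ≠ [])]
      simp [List.append_assoc]

-- structural version of Python str.split(sep) for nonempty sep
def pvSplit (sep : List Char) : List Char → List (List Char)
  | [] => [[]]
  | c :: t =>
    if h : sep ≠ [] ∧ sep.isPrefixOf (c :: t) then
      [] :: pvSplit sep ((c :: t).drop sep.length)
    else
      match pvSplit sep t with
      | [] => [[]]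
      | hd :: tl => (c :: hd) :: tl
termination_by s => s.length
decreasing_by
  · have hs : sep.length ≥ 1 := by
      cases sep with
      | nil => exact absurd rfl h.1
      | cons a t => simp
    simp [List.length_drop]; omega
  · simp

lemma pvSplit_ne_nil (sep s : List Char) : pvSplit sep s ≠ [] := by
  cases s with
  | nil => simp [pvSplit]
  | cons c t =>
    rw [pvSplit]
    split
    · simp
    · split <;> simp

lemma pvSplit_cons (sep : List Char) (c : Char) (t : List Char)
    (h : ¬ sep.isPrefixOf (c :: t)) :
    pvSplit sep (c :: t) = (c :: (pvSplit sep t).headI) :: (pvSplit sep t).tail := by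
  rw [pvSplit, dif_neg (by tauto)]
  rcases hx : pvSplit sep t with _ | ⟨h', tl⟩
  · exact absurd hx (pvSplit_ne_nil sep t)
  · simp

lemma pvSplit_sep (sep t : List Char) (hsep : sep ≠ []) :
    pvSplit sep (sep ++ t) = [] :: pvSplit sep t := by
  cases sep with
  | nil => exact absurd rfl hsep
  | cons a sep' =>
    have hpre : (a :: sep').isPrefixOf (a :: (sep' ++ t)) := by
      rw [List.isPrefixOf_iff_prefix]
      exact ⟨t, rfl⟩
    rw [show (a :: sep') ++ t = a :: (sep' ++ t) from rfl, pvSplit, dif_pos ⟨by simp, hpre⟩]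
    have hd : (a :: (sep' ++ t)).drop (a :: sep').length = t := by
      rw [show a :: (sep' ++ t) = (a :: sep') ++ t from rfl]
      simp
    rw [hd]

lemma pvSplitOn_go_eq (sep : List Char) (hsep : sep ≠ []) :
    ∀ (fuel : Nat) (l : List Char), l.length < fuel → ∀ (cur : List Char) (acc : List (List Char)),
    PySem.Chars.splitOn.go sep fuel l cur acc
      = acc.reverse ++ (cur.reverse ++ (pvSplit sep l).headI) :: (pvSplit sep l).tail := by
  have hsl : 1 ≤ sep.length := by
    cases sep with
    | nil => exact absurd rfl hsep
    | cons a t => simp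
  intro fuel
  induction fuel with
  | zero => intro l hl; omega
  | succ f ih =>
    intro l hl cur acc
    cases l with
    | nil =>
      show (cur.reverse :: acc).reverse = _
      simp [pvSplit]
    | cons c rest =>
      rw [show PySem.Chars.splitOn.go sep (f + 1) (c :: rest) cur acc
          = if sep.isPrefixOf (c :: rest) then
              PySem.Chars.splitOn.go sep f ((c :: rest).drop sep.length) [] (cur.reverse :: acc)
            else PySem.Chars.splitOn.go sep f rest (c :: cur) acc from rfl]
      by_cases hp : sep.isPrefixOf (c :: rest)
      · rw [if_pos hp]
        rw [ih _ (by simp at hl ⊢; omega) [] (cur.reverse :: acc)]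
        rw [pvSplit, dif_pos ⟨hsep, hp⟩]
        rcases hx : pvSplit sep ((c :: rest).drop sep.length) with _ | ⟨h', tl⟩
        · exact absurd hx (pvSplit_ne_nil _ _)
        · simp
      · rw [if_neg hp]
        rw [ih rest (by simp at hl ⊢; omega) (c :: cur) acc]
        rw [pvSplit_cons sep c rest hp]
        rcases hx : pvSplit sep rest with _ | ⟨h', tl⟩
        · exact absurd hx (pvSplit_ne_nil _ _)
        · simp

lemma pvSplitOn_eq (sep s : List Char) (hsep : sep ≠ []) :
    PySem.Chars.splitOn s sep = pvSplit sep s := by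
  show PySem.Chars.splitOn.go sep (s.length + 1) s [] [] = _
  rw [pvSplitOn_go_eq sep hsep (s.length + 1) s (by omega) [] []]
  rcases hx : pvSplit sep s with _ | ⟨h', tl⟩
  · exact absurd hx (pvSplit_ne_nil _ _)
  · simp

def pvLetters (w : List Char) : List (List Char) := (pvSplit [' '] w).filter (fun l => decide (l ≠ []))
def pvWords (s : List Char) : List (List Char) := (pvSplit [' ', ' ', ' '] s).filter (fun w => decide (w ≠ []))
def pvL (l : List Char) : List (String × Int) := pvJoin ("gap", (1 : Int)) (l.map pvSymOut)
def pvW (w : List Char) : List (String × Int) := pvJoin ("gap", (3 : Int)) ((pvLetters w).map pvL)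
def pvA (s : List Char) : List (String × Int) := pvJoin ("gap", (7 : Int)) ((pvWords s).map pvW)

-- reference result: head-recursive over symbol/space-run structure
def pvOut : List Char → List (String × Int)
  | [] => []
  | c :: rest =>
    pvTn c :: (if rest.dropWhile (· == ' ') = [] then []
      else ("gap", pvGapVal (rest.takeWhile (· == ' ')).length) :: pvOut (rest.dropWhile (· == ' ')))
termination_by s => s.length
decreasing_by
  have := List.length_dropWhile_le (· == ' ') rest
  simp; omega

-- B's loop body
def pvStep (st : List (String × Int) × Int × Bool) (c : Char) : List (String × Int) × Int × Bool :=
  if c = ' ' then (st.1, st.2.1 + 1, st.2.2)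
  else if c = '.' ∨ c = '-' then
    let ev := if st.2.2 then
        st.1 ++ [("gap", if st.2.1 = 0 then (1 : Int) else if st.2.1 < 3 then 3 else 7)]
      else st.1
    (ev ++ [("tone", if c = '.' then (1 : Int) else 3)], 0, true)
  else st

lemma pvAlt_eq (morse_code : String) :
    parse_morse_sequence_py_alt morse_code
      = ((PySem.Chars.strip morse_code.toList).foldl pvStep ([], 0, false)).1 := rfl

def pvValid (s : List Char) : Prop := ∀ c ∈ s, c = '.' ∨ c = '-' ∨ c = ' '

-- ---- decomposition of a space run ----
lemma pvDecomp (l : List Char) : ∃ k t, l = pvSp k ++ t ∧ t.head? ≠ some ' ' := by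
  induction l with
  | nil => exact ⟨0, [], rfl, by simp⟩
  | cons c l' ih =>
    by_cases hc : c = ' '
    · obtain ⟨k, t, h1, h2⟩ := ih
      exact ⟨k + 1, t, by simp [pvSp, List.replicate_succ, h1, hc], h2⟩
    · exact ⟨0, c :: l', rfl, by simp [hc]⟩

lemma pvTakeWhile_sp (k : Nat) (t : List Char) (ht : t.head? ≠ some ' ') :
    (pvSp k ++ t).takeWhile (· == ' ') = pvSp k ∧ (pvSp k ++ t).dropWhile (· == ' ') = t := by
  induction k with
  | zero =>
    cases t with
    | nil => simp [pvSp]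
    | cons a t' =>
      have ha : a ≠ ' ' := by simp at ht; exact ht
      simp [pvSp, ha]
  | succ k ih =>
    rw [show pvSp (k + 1) ++ t = ' ' :: (pvSp k ++ t) by simp [pvSp, List.replicate_succ]]
    constructor
    · rw [List.takeWhile_cons, if_pos (by decide), ih.1]
      simp [pvSp, List.replicate_succ]
    · rw [List.dropWhile_cons, if_pos (by decide), ih.2]

lemma pvOut_eq (c : Char) (k : Nat) (t : List Char) (ht : t.head? ≠ some ' ') :
    pvOut (c :: (pvSp k ++ t))
      = pvTn c :: (if t = [] then [] else ("gap", pvGapVal k) :: pvOut t) := by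
  rw [pvOut]
  rw [(pvTakeWhile_sp k t ht).1, (pvTakeWhile_sp k t ht).2]
  simp [pvSp]

-- ---- A-side structure lemmas ----
lemma pvLetters_space (w : List Char) : pvLetters (' ' :: w) = pvLetters w := by
  unfold pvLetters
  rw [show (' ' :: w) = [' '] ++ w from rfl, pvSplit_sep [' '] w (by simp)]
  simp

lemma pvSplit_nil_eq (sep : List Char) : pvSplit sep [] = [[]] := by simp [pvSplit]

lemma pvNP1 {c : Char} (hc : c ≠ ' ') (t : List Char) : ¬ [' '].isPrefixOf (c :: t) := by
  rw [List.isPrefixOf_iff_prefix]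
  rintro ⟨r, hr⟩
  rw [show [' '] ++ r = ' ' :: r from rfl] at hr
  injection hr with h1 _
  exact hc h1.symm

lemma pvNP3 {c : Char} (hc : c ≠ ' ') (t : List Char) : ¬ [' ', ' ', ' '].isPrefixOf (c :: t) := by
  rw [List.isPrefixOf_iff_prefix]
  rintro ⟨r, hr⟩
  rw [show [' ', ' ', ' '] ++ r = ' ' :: ' ' :: ' ' :: r from rfl] at hr
  injection hr with h1 _
  exact hc h1.symm

lemma pvNP3s1 {d : Char} (hd : d ≠ ' ') (v : List Char) :
    ¬ [' ', ' ', ' '].isPrefixOf (' ' :: d :: v) := by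
  rw [List.isPrefixOf_iff_prefix]
  rintro ⟨r, hr⟩
  rw [show [' ', ' ', ' '] ++ r = ' ' :: ' ' :: ' ' :: r from rfl] at hr
  injection hr with _ hr2
  injection hr2 with h2 _
  exact hd h2.symm

lemma pvNP3s2 {d : Char} (hd : d ≠ ' ') (v : List Char) :
    ¬ [' ', ' ', ' '].isPrefixOf (' ' :: ' ' :: d :: v) := by
  rw [List.isPrefixOf_iff_prefix]
  rintro ⟨r, hr⟩
  rw [show [' ', ' ', ' '] ++ r = ' ' :: ' ' :: ' ' :: r from rfl] at hr
  injection hr with _ hr2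
  injection hr2 with _ hr3
  injection hr3 with h3 _
  exact hd h3.symm

lemma pvSplit3_cons {d : Char} (hd : d ≠ ' ') (v : List Char) :
    pvSplit [' ', ' ', ' '] (d :: v)
      = (d :: (pvSplit [' ', ' ', ' '] v).headI) :: (pvSplit [' ', ' ', ' '] v).tail :=
  pvSplit_cons _ _ _ (pvNP3 hd v)

lemma pvSplit3_sp1 {d : Char} (hd : d ≠ ' ') (v : List Char) :
    pvSplit [' ', ' ', ' '] (' ' :: d :: v)
      = (' ' :: d :: (pvSplit [' ', ' ', ' '] v).headI) :: (pvSplit [' ', ' ', ' '] v).tail := by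
  rw [pvSplit_cons _ _ _ (pvNP3s1 hd v), pvSplit3_cons hd v]
  simp

lemma pvSplit3_sp2 {d : Char} (hd : d ≠ ' ') (v : List Char) :
    pvSplit [' ', ' ', ' '] (' ' :: ' ' :: d :: v)
      = (' ' :: ' ' :: d :: (pvSplit [' ', ' ', ' '] v).headI) :: (pvSplit [' ', ' ', ' '] v).tail := by
  rw [pvSplit_cons _ _ _ (pvNP3s2 hd v), pvSplit3_sp1 hd v]
  simp

lemma pvWords_cons {d : Char} (hd : d ≠ ' ') (v : List Char) :
    pvWords (d :: v) = (d :: (pvSplit [' ', ' ', ' '] v).headI)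
      :: ((pvSplit [' ', ' ', ' '] v).tail).filter (fun w => decide (w ≠ [])) := by
  unfold pvWords
  rw [pvSplit3_cons hd v, List.filter_cons]
  simp

lemma pvLetters_cons {c : Char} (hc : c ≠ ' ') (w : List Char) :
    pvLetters (c :: w) = (c :: (pvSplit [' '] w).headI)
      :: ((pvSplit [' '] w).tail).filter (fun l => decide (l ≠ [])) := by
  unfold pvLetters
  rw [pvSplit_cons _ _ _ (pvNP1 hc w), List.filter_cons]
  simp

lemma pvLetters_cons_space {c : Char} (hc : c ≠ ' ') (w : List Char) :
    pvLetters (c :: ' ' :: w) = [c] :: pvLetters w := by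
  unfold pvLetters
  rw [pvSplit_cons _ _ _ (pvNP1 hc _), show (' ' :: w) = [' '] ++ w from rfl,
    pvSplit_sep [' '] w (by simp), List.filter_cons]
  simp

lemma pvL_single {c : Char} (hc : c = '.' ∨ c = '-') : pvL [c] = [pvTn c] := by
  unfold pvL
  rw [List.map_cons, List.map_nil, show pvJoin ("gap", (1 : Int)) [pvSymOut c] = pvSymOut c from rfl,
    pvSymOut_sym hc]

lemma pvL_cons {c : Char} (hc : c = '.' ∨ c = '-') {l : List Char} (hl : l ≠ []) :
    pvL (c :: l) = pvTn c :: ("gap", 1) :: pvL l := by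
  unfold pvL
  rw [List.map_cons, pvJoin_cons_ne _ _ (by simpa using hl), pvSymOut_sym hc]
  rfl

lemma pvW_single {c : Char} (hc : c = '.' ∨ c = '-') : pvW [c] = [pvTn c] := by
  have hc' : c ≠ ' ' := by rcases hc with h | h <;> simp [h]
  unfold pvW
  rw [pvLetters_cons hc' [], pvSplit_nil_eq]
  simp [pvJoin, pvL_single hc]

lemma pvJoin2 {α : Type} (sep x y : α) (p : List α) (l : List (List α)) :
    pvJoin sep ((x :: y :: p) :: l) = x :: y :: pvJoin sep (p :: l) := by
  rw [pvJoin_cons_head, pvJoin_cons_head]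

lemma pvW_space (w : List Char) : pvW (' ' :: w) = pvW w := by
  unfold pvW
  rw [pvLetters_space]

lemma pvW_step (c : Char) (hc : c = '.' ∨ c = '-') (k : Nat) (hk : k ≤ 2) (d : Char)
    (hd : d ≠ ' ') (v : List Char) :
    pvW (c :: (pvSp k ++ (d :: v))) = pvTn c :: ("gap", pvGapVal k) :: pvW (d :: v) := by
  have hc' : c ≠ ' ' := by rcases hc with h | h <;> simp [h]
  have hgl : pvSplit [' '] (d :: v) = (d :: (pvSplit [' '] v).headI) :: (pvSplit [' '] v).tail :=
    pvSplit_cons _ _ _ (pvNP1 hd v)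
  interval_cases k
  · rw [show pvSp 0 ++ (d :: v) = d :: v by simp [pvSp]]
    unfold pvW
    rw [pvLetters_cons hc' (d :: v), pvLetters_cons hd v, hgl]
    simp only [List.headI, List.tail_cons, List.map_cons]
    rw [pvL_cons hc (by simp), pvJoin2]
    rfl
  · rw [show pvSp 1 ++ (d :: v) = ' ' :: d :: v by simp [pvSp]]
    unfold pvW
    rw [pvLetters_cons_space hc' (d :: v), pvLetters_cons hd v, List.map_cons,
      pvJoin_cons_ne _ _ (by simp), pvL_single hc]
    rfl
  · rw [show pvSp 2 ++ (d :: v) = ' ' :: ' ' :: d :: v by simp [pvSp, List.replicate]]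
    rw [show (c :: (' ' :: ' ' :: d :: v)) = c :: ' ' :: (' ' :: d :: v) from rfl]
    unfold pvW
    rw [pvLetters_cons_space hc' (' ' :: d :: v), pvLetters_space, pvLetters_cons hd v,
      List.map_cons, pvJoin_cons_ne _ _ (by simp), pvL_single hc]
    rfl

lemma pvWords_sep3 (u : List Char) : pvWords ([' ', ' ', ' '] ++ u) = pvWords u := by
  unfold pvWords
  rw [pvSplit_sep _ _ (by simp), List.filter_cons]
  simp

lemma pvSp_add3 (m : Nat) (u : List Char) :
    pvSp (m + 3) ++ u = [' ', ' ', ' '] ++ (pvSp m ++ u) := by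
  rw [show m + 3 = 3 + m by omega]
  simp [pvSp, List.replicate_add]

lemma pvWords_sp (k : Nat) (d : Char) (v : List Char) (hd : d ≠ ' ') :
    (pvWords (pvSp k ++ (d :: v))).map pvW = (pvWords (d :: v)).map pvW
      ∧ pvWords (pvSp k ++ (d :: v)) ≠ [] := by
  induction k using Nat.strong_induction_on with
  | _ k IH =>
    rcases k with _ | _ | _ | m
    · rw [show pvSp 0 ++ (d :: v) = d :: v by simp [pvSp]]
      refine ⟨rfl, ?_⟩
      rw [pvWords_cons hd v]
      simp
    · rw [show pvSp 1 ++ (d :: v) = ' ' :: d :: v by simp [pvSp]]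
      constructor
      · rw [pvWords_cons hd v, show pvWords (' ' :: d :: v)
            = (' ' :: d :: (pvSplit [' ', ' ', ' '] v).headI)
              :: ((pvSplit [' ', ' ', ' '] v).tail).filter (fun w => decide (w ≠ [])) by
            unfold pvWords; rw [pvSplit3_sp1 hd v, List.filter_cons]; simp]
        rw [List.map_cons, List.map_cons,
          show pvW (' ' :: d :: (pvSplit [' ', ' ', ' '] v).headI)
            = pvW (d :: (pvSplit [' ', ' ', ' '] v).headI) from pvW_space _]
      · rw [show pvWords (' ' :: d :: v)
            = (' ' :: d :: (pvSplit [' ', ' ', ' '] v).headI)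
              :: ((pvSplit [' ', ' ', ' '] v).tail).filter (fun w => decide (w ≠ [])) by
            unfold pvWords; rw [pvSplit3_sp1 hd v, List.filter_cons]; simp]
        simp
    · rw [show pvSp 2 ++ (d :: v) = ' ' :: ' ' :: d :: v by simp [pvSp, List.replicate]]
      have hw2 : pvWords (' ' :: ' ' :: d :: v)
          = (' ' :: ' ' :: d :: (pvSplit [' ', ' ', ' '] v).headI)
            :: ((pvSplit [' ', ' ', ' '] v).tail).filter (fun w => decide (w ≠ [])) := by
        unfold pvWords; rw [pvSplit3_sp2 hd v, List.filter_cons]; simp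
      constructor
      · rw [pvWords_cons hd v, hw2, List.map_cons, List.map_cons,
          show pvW (' ' :: ' ' :: d :: (pvSplit [' ', ' ', ' '] v).headI)
            = pvW (d :: (pvSplit [' ', ' ', ' '] v).headI) by rw [pvW_space, pvW_space]]
      · rw [hw2]; simp
    · rw [show m + 1 + 1 + 1 = m + 3 by omega, pvSp_add3 m (d :: v), pvWords_sep3]
      exact IH m (by omega)

lemma pvA_step (c : Char) (hc : c = '.' ∨ c = '-') (k : Nat) (d : Char) (v : List Char)
    (hd : d ≠ ' ') :
    pvA (c :: (pvSp k ++ (d :: v))) = pvTn c :: ("gap", pvGapVal k) :: pvA (d :: v) := by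
  have hc' : c ≠ ' ' := by rcases hc with h | h <;> simp [h]
  by_cases hk : k ≤ 2
  · have hsplit : pvSplit [' ', ' ', ' '] (pvSp k ++ (d :: v))
        = (pvSp k ++ (d :: (pvSplit [' ', ' ', ' '] v).headI)) :: (pvSplit [' ', ' ', ' '] v).tail := by
      interval_cases k
      · simpa [pvSp] using pvSplit3_cons hd v
      · rw [show pvSp 1 ++ (d :: v) = ' ' :: d :: v by simp [pvSp]]
        simpa [pvSp] using pvSplit3_sp1 hd v
      · rw [show pvSp 2 ++ (d :: v) = ' ' :: ' ' :: d :: v by simp [pvSp, List.replicate]]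
        simpa [pvSp, List.replicate] using pvSplit3_sp2 hd v
    unfold pvA
    rw [show pvWords (c :: (pvSp k ++ (d :: v)))
        = (c :: (pvSp k ++ (d :: (pvSplit [' ', ' ', ' '] v).headI)))
          :: ((pvSplit [' ', ' ', ' '] v).tail).filter (fun w => decide (w ≠ [])) by
      unfold pvWords
      rw [pvSplit_cons _ _ _ (pvNP3 hc' _), hsplit, List.filter_cons]
      simp]
    rw [pvWords_cons hd v, List.map_cons, List.map_cons,
      pvW_step c hc k hk d hd _, pvJoin2]
  · obtain ⟨m, rfl⟩ : ∃ m, k = m + 3 := ⟨k - 3, by omega⟩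
    have hwords : pvWords (c :: (pvSp (m + 3) ++ (d :: v)))
        = [c] :: pvWords (pvSp m ++ (d :: v)) := by
      unfold pvWords
      rw [pvSplit_cons _ _ _ (pvNP3 hc' _), pvSp_add3 m (d :: v), pvSplit_sep _ _ (by simp),
        List.filter_cons]
      simp
    unfold pvA
    have hg7 : pvGapVal (m + 3) = 7 := by
      have h1 : m + 3 ≠ 0 := by omega
      have h2 : ¬ m + 3 < 3 := by omega
      unfold pvGapVal
      rw [if_neg h1, if_neg h2]
    rw [hwords, List.map_cons, pvW_single hc, (pvWords_sp m d v hd).1, pvWords_cons hd v,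
      List.map_cons, pvJoin_cons_ne _ _ (by simp), hg7]
    rfl

lemma pvA_nil : pvA [] = [] := by
  unfold pvA pvWords
  rw [pvSplit_nil_eq]
  simp [pvJoin]

lemma pvOut_nil : pvOut [] = [] := by simp [pvOut]

lemma pvOut_single (c : Char) : pvOut [c] = [pvTn c] := by
  rw [pvOut]
  simp

lemma pvA_single (c : Char) (hc : c = '.' ∨ c = '-') : pvA [c] = [pvTn c] := by
  have hc' : c ≠ ' ' := by rcases hc with h | h <;> simp [h]
  unfold pvA
  rw [pvWords_cons hc' [], pvSplit_nil_eq]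
  simp [pvJoin, pvW_single hc]

lemma pvLast_sp {c : Char} {k : Nat}
    (hl : (c :: (pvSp k ++ ([] : List Char))).getLast? ≠ some ' ') : k = 0 := by
  by_contra h
  obtain ⟨m, rfl⟩ : ∃ m, k = m + 1 := ⟨k - 1, by omega⟩
  apply hl
  rw [show c :: (pvSp (m + 1) ++ []) = (c :: pvSp m) ++ [' '] by
    simp [pvSp, List.replicate_succ']]
  exact List.getLast?_concat

lemma pvA_eq_pvOut : ∀ (s : List Char), pvValid s → s.head? ≠ some ' ' → s.getLast? ≠ some ' ' →
    pvA s = pvOut s := by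
  suffices H : ∀ (n : Nat) (s : List Char), s.length ≤ n → pvValid s → s.head? ≠ some ' ' →
      s.getLast? ≠ some ' ' → pvA s = pvOut s by
    exact fun s => H s.length s le_rfl
  intro n
  induction n with
  | zero =>
    intro s hs _ _ _
    have hs0 : s = [] := List.length_eq_zero_iff.mp (by omega)
    subst hs0
    rw [pvA_nil, pvOut_nil]
  | succ n ih =>
    intro s hs hv hh hl
    cases s with
    | nil => rw [pvA_nil, pvOut_nil]
    | cons c rest =>
      have hcs : c ≠ ' ' := by simpa using hh
      have hc : c = '.' ∨ c = '-' := by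
        rcases hv c (List.mem_cons_self) with h | h | h
        · exact Or.inl h
        · exact Or.inr h
        · exact absurd h hcs
      obtain ⟨k, t, hrest, hht⟩ := pvDecomp rest
      subst hrest
      cases t with
      | nil =>
        have hk : k = 0 := pvLast_sp hl
        subst hk
        rw [show (c :: (pvSp 0 ++ ([] : List Char))) = [c] by simp [pvSp]]
        rw [pvA_single c hc, pvOut_single]
      | cons d v =>
        have hd : d ≠ ' ' := by simpa using hht
        have hvalid' : pvValid (d :: v) := fun x hx =>
          hv x (List.mem_cons_of_mem _ (List.mem_append_right _ hx))
        have hlast' : (d :: v).getLast? ≠ some ' ' := by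
          rw [show (c :: (pvSp k ++ d :: v)) = (c :: pvSp k) ++ (d :: v) by simp] at hl
          rwa [List.getLast?_append_of_ne_nil _ (show (d :: v) ≠ [] by simp)] at hl
        have ihs : pvA (d :: v) = pvOut (d :: v) :=
          ih (d :: v) (by simp [pvSp] at hs ⊢; omega) hvalid' (by simp [hd]) hlast'
        rw [pvA_step c hc k d v hd, ihs, pvOut_eq c k (d :: v) hht]
        simp

-- ---- port A equals pvA ----
lemma pvSplitOn3 (s : List Char) :
    PySem.Chars.splitOn s [' ', ' ', ' '] = pvSplit [' ', ' ', ' '] s :=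
  pvSplitOn_eq _ _ (by simp)

lemma pvSplitOn1 (s : List Char) : PySem.Chars.splitOn s [' '] = pvSplit [' '] s :=
  pvSplitOn_eq _ _ (by simp)

lemma pvFoldInner (letter : List Char) (ev : List (String × Int)) :
    (PySem.List.enumerate letter).foldl (fun ev si =>
      if si.1 ≠ (letter.length : Int) - 1
      then (if si.2 = '.' then ev ++ [("tone", (1 : Int))]
            else if si.2 = '-' then ev ++ [("tone", (3 : Int))] else ev) ++ [("gap", (1 : Int))]
      else (if si.2 = '.' then ev ++ [("tone", (1 : Int))]
            else if si.2 = '-' then ev ++ [("tone", (3 : Int))] else ev)) ev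
    = ev ++ pvL letter := by
  refine (congrArg (fun f => List.foldl f ev (PySem.List.enumerate letter)) ?_).trans
    (pvEnumFold pvSymOut ("gap", 1) ((letter.length : Int) - 1) letter 0 ev (by omega))
  funext ev' si
  simp only [pvSymOut]
  split_ifs <;> simp

lemma pvFoldMid (w : List Char) (ev : List (String × Int)) :
    (PySem.List.enumerate ((pvSplit [' '] w).filter (fun l => decide (l ≠ [])))).foldl
      (fun ev li =>
        if li.1 ≠ (((pvSplit [' '] w).filter (fun l => decide (l ≠ []))).length : Int) - 1
        then ((PySem.List.enumerate li.2).foldl (fun ev si =>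
            if si.1 ≠ (li.2.length : Int) - 1
            then (if si.2 = '.' then ev ++ [("tone", (1 : Int))]
                  else if si.2 = '-' then ev ++ [("tone", (3 : Int))] else ev) ++ [("gap", (1 : Int))]
            else (if si.2 = '.' then ev ++ [("tone", (1 : Int))]
                  else if si.2 = '-' then ev ++ [("tone", (3 : Int))] else ev)) ev) ++ [("gap", (3 : Int))]
        else ((PySem.List.enumerate li.2).foldl (fun ev si =>
            if si.1 ≠ (li.2.length : Int) - 1
            then (if si.2 = '.' then ev ++ [("tone", (1 : Int))]
                  else if si.2 = '-' then ev ++ [("tone", (3 : Int))] else ev) ++ [("gap", (1 : Int))]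
            else (if si.2 = '.' then ev ++ [("tone", (1 : Int))]
                  else if si.2 = '-' then ev ++ [("tone", (3 : Int))] else ev)) ev)) ev
    = ev ++ pvW w := by
  refine (congrArg (fun f => List.foldl f ev
      (PySem.List.enumerate ((pvSplit [' '] w).filter (fun l => decide (l ≠ []))))) ?_).trans
    (pvEnumFold pvL ("gap", 3)
      ((((pvSplit [' '] w).filter (fun l => decide (l ≠ []))).length : Int) - 1)
      ((pvSplit [' '] w).filter (fun l => decide (l ≠ []))) 0 ev (by omega))
  funext ev' li
  rw [pvFoldInner li.2 ev']

lemma pvPortA_eq (morse_code : String) :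
    parse_morse_sequence_py morse_code = pvA (PySem.Chars.strip morse_code.toList) := by
  by_cases h : PySem.Chars.strip morse_code.toList = []
  · simp [parse_morse_sequence_py, h, pvA_nil]
  · simp only [parse_morse_sequence_py]
    rw [if_neg h]
    simp only [pvSplitOn3, pvSplitOn1]
    refine (congrArg (fun f => List.foldl f ([] : List (String × Int))
        (PySem.List.enumerate ((pvSplit [' ', ' ', ' '] (PySem.Chars.strip morse_code.toList)).filter
          (fun w => decide (w ≠ []))))) ?_).trans
      (pvEnumFold pvW ("gap", 7)
        ((((pvSplit [' ', ' ', ' '] (PySem.Chars.strip morse_code.toList)).filter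
          (fun w => decide (w ≠ []))).length : Int) - 1)
        ((pvSplit [' ', ' ', ' '] (PySem.Chars.strip morse_code.toList)).filter
          (fun w => decide (w ≠ []))) 0 [] (by omega))
    funext ev' wi
    rw [pvFoldMid wi.2 ev']

-- ---- B-side scan lemmas ----
lemma pvScan_sp (k : Nat) : ∀ (t : List Char) (acc : List (String × Int)) (j : Int),
    (pvSp k ++ t).foldl pvStep (acc, j, true) = t.foldl pvStep (acc, j + k, true) := by
  induction k with
  | zero => intro t acc j; simp [pvSp]
  | succ k ih =>
    intro t acc j
    rw [show pvSp (k + 1) ++ t = ' ' :: (pvSp k ++ t) by simp [pvSp, List.replicate_succ]]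
    rw [List.foldl_cons, show pvStep (acc, j, true) ' ' = (acc, j + 1, true) from rfl, ih,
      show j + 1 + (k : Int) = j + ((k + 1 : Nat) : Int) by push_cast; ring]

lemma pvGapI_cast (k : Nat) :
    (if (k : Int) = 0 then (1 : Int) else if (k : Int) < 3 then 3 else 7) = pvGapVal k := by
  unfold pvGapVal
  split_ifs <;> omega

lemma pvScan_run : ∀ (s : List Char), pvValid s → s.head? ≠ some ' ' → s ≠ [] →
    s.getLast? ≠ some ' ' → ∀ (acc : List (String × Int)) (j : Int),
    s.foldl pvStep (acc, j, true)
      = (acc ++ ("gap", if j = 0 then (1 : Int) else if j < 3 then 3 else 7) :: pvOut s, 0, true) := by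
  suffices H : ∀ (n : Nat) (s : List Char), s.length ≤ n → pvValid s → s.head? ≠ some ' ' →
      s ≠ [] → s.getLast? ≠ some ' ' → ∀ (acc : List (String × Int)) (j : Int),
      s.foldl pvStep (acc, j, true)
        = (acc ++ ("gap", if j = 0 then (1 : Int) else if j < 3 then 3 else 7) :: pvOut s, 0, true) by
    exact fun s hv hh hne hl => H s.length s le_rfl hv hh hne hl
  intro n
  induction n with
  | zero => intro s hs _ _ hne _; cases s with
    | nil => exact absurd rfl hne
    | cons c rest => simp at hs
  | succ n ih =>
    intro s hs hv hh hne hl acc j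
    cases s with
    | nil => exact absurd rfl hne
    | cons c rest =>
      have hcs : c ≠ ' ' := by simpa using hh
      have hc : c = '.' ∨ c = '-' := by
        rcases hv c (List.mem_cons_self) with h | h | h
        · exact Or.inl h
        · exact Or.inr h
        · exact absurd h hcs
      have hstep : pvStep (acc, j, true) c
          = (acc ++ [("gap", if j = 0 then (1 : Int) else if j < 3 then 3 else 7), pvTn c],
             0, true) := by
        rcases hc with h | h <;> subst h <;> simp [pvStep, pvTn]
      obtain ⟨k, t, hrest, hht⟩ := pvDecomp rest
      subst hrest
      rw [List.foldl_cons, hstep, pvScan_sp k t _ _]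
      cases t with
      | nil =>
        have hk : k = 0 := pvLast_sp hl
        subst hk
        rw [show (c :: (pvSp 0 ++ ([] : List Char))) = [c] by simp [pvSp], pvOut_single]
        simp
      | cons d v =>
        have hd : d ≠ ' ' := by simpa using hht
        have hvalid' : pvValid (d :: v) := fun x hx =>
          hv x (List.mem_cons_of_mem _ (List.mem_append_right _ hx))
        have hlast' : (d :: v).getLast? ≠ some ' ' := by
          rw [show (c :: (pvSp k ++ d :: v)) = (c :: pvSp k) ++ (d :: v) by simp] at hl
          rwa [List.getLast?_append_of_ne_nil _ (show (d :: v) ≠ [] by simp)] at hl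
        rw [show ((0 : Int) + (k : Int)) = (k : Int) by omega] at *
        rw [ih (d :: v) (by simp [pvSp] at hs ⊢; omega) hvalid' (by simp [hd]) (by simp) hlast'
          (acc ++ [("gap", if j = 0 then (1 : Int) else if j < 3 then 3 else 7), pvTn c]) (k : Int)]
        rw [pvGapI_cast k, pvOut_eq c k (d :: v) hht]
        simp

lemma pvPortB_eq (s : List Char) (hv : pvValid s) (hh : s.head? ≠ some ' ')
    (ht : s.getLast? ≠ some ' ') : (s.foldl pvStep ([], 0, false)).1 = pvOut s := by
  cases s with
  | nil => rw [pvOut_nil]; rfl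
  | cons c rest =>
    have hcs : c ≠ ' ' := by simpa using hh
    have hc : c = '.' ∨ c = '-' := by
      rcases hv c (List.mem_cons_self) with h | h | h
      · exact Or.inl h
      · exact Or.inr h
      · exact absurd h hcs
    have hstep : pvStep ([], 0, false) c = ([pvTn c], 0, true) := by
      rcases hc with h | h <;> subst h <;> simp [pvStep, pvTn]
    obtain ⟨k, t, hrest, hht⟩ := pvDecomp rest
    subst hrest
    rw [List.foldl_cons, hstep, pvScan_sp k t _ _]
    cases t with
    | nil =>
      have hk : k = 0 := pvLast_sp ht
      subst hk
      rw [show (c :: (pvSp 0 ++ ([] : List Char))) = [c] by simp [pvSp], pvOut_single]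
      simp
    | cons d v =>
      have hd : d ≠ ' ' := by simpa using hht
      have hvalid' : pvValid (d :: v) := fun x hx =>
        hv x (List.mem_cons_of_mem _ (List.mem_append_right _ hx))
      have hlast' : (d :: v).getLast? ≠ some ' ' := by
        rw [show (c :: (pvSp k ++ d :: v)) = (c :: pvSp k) ++ (d :: v) by simp] at ht
        rwa [List.getLast?_append_of_ne_nil _ (show (d :: v) ≠ [] by simp)] at ht
      rw [show ((0 : Int) + (k : Int)) = (k : Int) by omega]
      rw [pvScan_run (d :: v) hvalid' (by simp [hd]) (by simp) hlast' [pvTn c] (k : Int)]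
      rw [pvGapI_cast k, pvOut_eq c k (d :: v) hht]
      simp

-- ---- stripped string is clean ----
lemma pvDropWhile_head {p : Char → Bool} {l : List Char} {a : Char}
    (h : (l.dropWhile p).head? = some a) : p a = false := by
  induction l with
  | nil => simp [List.dropWhile] at h
  | cons b l' ih =>
    by_cases hp : p b
    · rw [List.dropWhile_cons, if_pos hp] at h
      exact ih h
    · rw [List.dropWhile_cons, if_neg hp] at h
      simp at h
      rw [← h]
      simpa using hp

lemma pvStrip_head (s : List Char) : (PySem.Chars.strip s).head? ≠ some ' ' := by
  intro h
  set u := List.dropWhile PySem.Chars.isspace s with hu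
  have hstrip : PySem.Chars.strip s
      = (List.dropWhile PySem.Chars.isspace u.reverse).reverse := rfl
  obtain ⟨pre, hpre⟩ := List.dropWhile_suffix (l := u.reverse) PySem.Chars.isspace
  have hurev : u = (List.dropWhile PySem.Chars.isspace u.reverse).reverse ++ pre.reverse := by
    have h2 := congrArg List.reverse hpre
    simpa using h2.symm
  have hne : (List.dropWhile PySem.Chars.isspace u.reverse).reverse ≠ [] := by
    intro hnil
    rw [hstrip, hnil] at h
    simp at h
  have hhead : u.head? = some ' ' := by
    rw [hurev, List.head?_append_of_ne_nil _ hne, ← hstrip, h]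
  have := pvDropWhile_head (p := PySem.Chars.isspace) (l := s) (a := ' ') (by rw [← hu]; exact hhead)
  simp [PySem.Chars.isspace] at this

lemma pvStrip_last (s : List Char) : (PySem.Chars.strip s).getLast? ≠ some ' ' := by
  intro h
  have hstrip : PySem.Chars.strip s
      = (List.dropWhile PySem.Chars.isspace (List.dropWhile PySem.Chars.isspace s).reverse).reverse := rfl
  rw [hstrip, List.getLast?_reverse] at h
  have := pvDropWhile_head h
  simp [PySem.Chars.isspace] at this

lemma pvPre_valid {m : String} (h : Pre_parse_morse_sequence_py m) :
    pvValid (PySem.Chars.strip m.toList) := by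
  intro c hc
  have h2 := List.all_eq_true.mp h c hc
  simp at h2
  tauto

-- ===== VERDICT (by name: the statement is the Claim_ definition above) =====
theorem parse_morse_sequence_py_spec : Claim_equal_parse_morse_sequence_py := by
  intro morse_code _hdom hpre
  unfold Spec_parse_morse_sequence_py
  rw [pvPortA_eq, pvAlt_eq,
    pvPortB_eq _ (pvPre_valid hpre) (pvStrip_head _) (pvStrip_last _),
    pvA_eq_pvOut _ (pvPre_valid hpre) (pvStrip_head _) (pvStrip_last _)]
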